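-- pv_equiv track=rewrite | github.com/kyh-25/shortread | BWTsearch.py | build_c_table
-- ===== SOURCE A (Python) =====
-- from collections import defaultdict,Counter
--
-- def build_c_table(bwt):
--     #각 문자별 카운트
--     counts = defaultdict(int)
--     for c in bwt:
--         counts[c] += 1
--     #사전순으로 누적합
--     c_table = {}
--     total = 0
--     for c in sorted(counts.keys()):
--         c_table[c] = total
--         total += counts[c]
--     return c_table
-- ===== SOURCE B (Python) =====
-- def build_c_table(bwt):
--     # sort once; a character's first position in the sorted text is the
--     # number of characters that sort before it, i.e. the cumulative count
--     c_table = {}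
--     for i, c in enumerate(sorted(bwt)):
--         if c not in c_table:
--             c_table[c] = i
--     return c_table
-- ===== Notes on version B (the rewrite author's own statement) =====
-- stated objective: alternative
-- what changed: Replaces count-then-cumulative-sum (Counter dict plus a running total over sorted keys) by sort-then-first-position: sort the whole text once and record each character's first index in the sorted text, which equals the number of characters sorting before it.
import Mathlib
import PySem

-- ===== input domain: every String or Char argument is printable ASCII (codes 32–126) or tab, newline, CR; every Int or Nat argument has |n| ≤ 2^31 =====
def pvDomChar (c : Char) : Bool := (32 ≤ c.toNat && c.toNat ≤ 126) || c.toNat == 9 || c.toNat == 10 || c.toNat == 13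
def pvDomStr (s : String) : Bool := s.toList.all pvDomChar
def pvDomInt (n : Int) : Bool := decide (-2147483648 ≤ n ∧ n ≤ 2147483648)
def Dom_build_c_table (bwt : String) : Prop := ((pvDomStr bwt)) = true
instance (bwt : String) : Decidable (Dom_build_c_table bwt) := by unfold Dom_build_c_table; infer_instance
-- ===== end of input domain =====

-- B replaces A's count-then-cumulative-sum by sort-then-first-position (an alternative
-- decomposition of the same C-table; same results, similar cost).

-- ===== PORT A =====
-- A: count every character, then accumulate the counts over the sorted keys.
def build_c_table (bwt : String) : List (String × Int) :=
  let counts : PySem.Dict Char Int :=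
    bwt.toList.foldl (fun d c => d.modify c 0 (· + 1)) PySem.Dict.empty
  let st :=
    (PySem.List.sorted counts.keys (fun c => c) false).foldl
      (fun (st : PySem.Dict Char Int × Int) c => (st.1.insert c st.2, st.2 + counts.getD c 0))
      (PySem.Dict.empty, 0)
  st.1.items.map (fun p => (p.1.toString, p.2))

-- ===== PORT B =====
-- B: sort the text once; record each character at its first index in the sorted text.
def build_c_table_alt (bwt : String) : List (String × Int) :=
  let tbl : PySem.Dict Char Int :=
    (PySem.List.enumerate (PySem.List.sorted bwt.toList (fun c => c) false) 0).foldl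
      (fun d p => if d.contains p.2 then d else d.insert p.2 p.1) PySem.Dict.empty
  tbl.items.map (fun p => (p.1.toString, p.2))

-- ===== PRECONDITION & SPEC =====
def Spec_build_c_table (bwt : String) (out : List (String × Int)) : Prop := out = build_c_table_alt bwt
instance (bwt : String) (out : List (String × Int)) : Decidable (Spec_build_c_table bwt out) := by unfold Spec_build_c_table; infer_instance

-- ===== CLAIM (what is proved, stated in full; the proofs are below) =====
def Claim_equal_build_c_table : Prop := ∀ (bwt : String), Dom_build_c_table bwt → Spec_build_c_table bwt (build_c_table bwt)

-- ===== LEMMAS AND PROOFS =====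

-- the common shape both folds produce: ((k₀, t), (k₁, t + g k₀), …)
def pvCTab (g : Char → Int) : List Char → Int → List (Char × Int)
  | [], _ => []
  | c :: cs, t => (c, t) :: pvCTab g cs (t + g c)

theorem pvCTab_congr (g g' : Char → Int) (ks : List Char) (t : Int)
    (h : ∀ c ∈ ks, g c = g' c) : pvCTab g ks t = pvCTab g' ks t := by
  induction ks generalizing t with
  | nil => rfl
  | cons c cs ih =>
    simp only [pvCTab, h c (by simp)]
    exact congrArg _ (ih _ (fun x hx => h x (List.mem_cons_of_mem _ hx)))

-- A's fold over fresh distinct keys produces pvCTab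
theorem pvFoldA (g : Char → Int) (ks : List Char) (d : PySem.Dict Char Int) (t : Int)
    (hnd : ks.Nodup) (hf : ∀ c ∈ ks, d.contains c = false) :
    ((ks.foldl (fun (st : PySem.Dict Char Int × Int) c => (st.1.insert c st.2, st.2 + g c))
      (d, t)).1).items = d.items ++ pvCTab g ks t := by
  induction ks generalizing d t with
  | nil => simp [pvCTab]
  | cons c cs ih =>
    simp only [List.foldl_cons, pvCTab]
    rw [ih (d.insert c t) (t + g c) hnd.of_cons ?_]
    · rw [PySem.Dict.items_insert_of_not_contains _ _ (hf c (by simp))]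
      simp
    · intro c' hc'
      rw [PySem.Dict.contains_insert]
      have : c' ≠ c := fun h => (List.nodup_cons.mp hnd).1 (h ▸ hc')
      simp [this, hf c' (by simp [hc'])]

-- skipping a run of an already-present character leaves the dict unchanged
theorem pvSkipRun (k : Char) (m : Nat) (n : Int) (d : PySem.Dict Char Int)
    (hk : d.contains k = true) :
    (PySem.List.enumerate (List.replicate m k) n).foldl
      (fun d p => if d.contains p.2 then d else d.insert p.2 p.1) d = d := by
  induction m generalizing n with
  | zero => simp [PySem.List.enumerate_nil]
  | succ m ih => simp [List.replicate_succ, PySem.List.enumerate_cons, hk, ih]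

-- B's fold over the runs of fresh distinct keys produces pvCTab
theorem pvFoldB (g : Char → Nat) (ks : List Char) (d : PySem.Dict Char Int) (n : Int)
    (hnd : ks.Nodup) (hf : ∀ c ∈ ks, d.contains c = false) (hpos : ∀ c ∈ ks, 0 < g c) :
    ((PySem.List.enumerate (ks.flatMap (fun k => List.replicate (g k) k)) n).foldl
      (fun d p => if d.contains p.2 then d else d.insert p.2 p.1) d).items
    = d.items ++ pvCTab (fun c => (g c : Int)) ks n := by
  induction ks generalizing d n with
  | nil => simp [pvCTab]
  | cons k ks ih =>
    have hg : 0 < g k := hpos k (by simp)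
    simp only [List.flatMap_cons, PySem.List.enumerate_append, List.foldl_append, pvCTab]
    -- the head run: first element inserts, the rest are skipped
    obtain ⟨m, hm⟩ : ∃ m, g k = m + 1 := ⟨g k - 1, by omega⟩
    rw [hm, List.replicate_succ, PySem.List.enumerate_cons, List.foldl_cons]
    rw [hf k (by simp), if_neg (by simp)]
    rw [pvSkipRun k m (n + 1) _ (PySem.Dict.contains_insert_self _ _ _)]
    rw [ih (d.insert k n) _ hnd.of_cons ?_ (fun c hc => hpos c (by simp [hc]))]
    · rw [PySem.Dict.items_insert_of_not_contains _ _ (hf k (by simp))]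
      simp
    · intro c' hc'
      rw [PySem.Dict.contains_insert]
      have : c' ≠ k := fun h => (List.nodup_cons.mp hnd).1 (h ▸ hc')
      simp [this, hf c' (by simp [hc'])]

-- counting inside the concatenation of runs
theorem pvCountFlat (g : Char → Nat) (ks : List Char) (hnd : ks.Nodup) (x : Char) :
    (ks.flatMap (fun k => List.replicate (g k) k)).count x = if x ∈ ks then g x else 0 := by
  induction ks with
  | nil => simp
  | cons k ks ih =>
    simp only [List.flatMap_cons, List.count_append, ih hnd.of_cons, List.count_replicate]
    by_cases hx : x = k
    · subst hx
      simp [(List.nodup_cons.mp hnd).1]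
    · simp [hx, Ne.symm hx]

-- the runs of strictly increasing keys, concatenated, are ordered
theorem pvRunsPairwise (g : Char → Nat) (ks : List Char) (hlt : ks.Pairwise (· < ·)) :
    (ks.flatMap (fun k => List.replicate (g k) k)).Pairwise (· ≤ ·) := by
  induction ks with
  | nil => simp
  | cons k ks ih =>
    simp only [List.flatMap_cons]
    rw [List.pairwise_append]
    refine ⟨List.pairwise_replicate.mpr (Or.inr le_rfl), ih hlt.of_cons, ?_⟩
    intro a ha b hb
    obtain ⟨k', hk', hb'⟩ := List.mem_flatMap.mp hb
    rw [List.eq_of_mem_replicate ha, List.eq_of_mem_replicate hb']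
    exact le_of_lt ((List.pairwise_cons.mp hlt).1 k' hk')

-- the sorted text is the concatenation of the runs of the sorted distinct characters
theorem pvSortedRuns (l : List Char) :
    PySem.List.sorted l (fun c => c) false
      = (PySem.List.sorted (PySem.Set.ofList l) (fun c => c) false).flatMap
          (fun k => List.replicate (l.count k) k) := by
  set ks := PySem.List.sorted (PySem.Set.ofList l) (fun c => c) false with hks
  have hndks : ks.Nodup := ((PySem.List.sorted_perm _ _ _).nodup_iff).mpr (PySem.Set.nodup_ofList l)
  have hmem : ∀ x, x ∈ ks ↔ x ∈ l := by
    intro x; rw [hks, PySem.List.mem_sorted, PySem.Set.mem_ofList]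
  have hlt : ks.Pairwise (· < ·) := by
    rw [hks]; exact PySem.List.sorted_ofList_pairwise_lt l
  apply PySem.List.sorted_id_eq_of_perm_of_pairwise
  · -- permutation, by counts
    rw [List.perm_iff_count]
    intro x
    rw [pvCountFlat _ _ hndks]
    by_cases hx : x ∈ ks
    · simp [hx]
    · simp [hx, List.count_eq_zero.mpr (fun h => hx ((hmem x).mpr h))]
  · exact pvRunsPairwise _ ks hlt

-- ===== VERDICT (by name: the statement is the Claim_ definition above) =====
theorem build_c_table_spec : Claim_equal_build_c_table := by
  intro bwt _
  unfold Spec_build_c_table build_c_table build_c_table_alt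
  set l := bwt.toList with hl
  have hcounter : l.foldl (fun d c => d.modify c 0 (· + 1)) PySem.Dict.empty
      = PySem.Dict.counter l := rfl
  simp only [hcounter, PySem.Dict.keys_counter]
  set ks := PySem.List.sorted (PySem.Set.ofList l) (fun c => c) false with hks
  have hndks : ks.Nodup := ((PySem.List.sorted_perm _ _ _).nodup_iff).mpr (PySem.Set.nodup_ofList l)
  -- A's side
  rw [pvFoldA _ ks PySem.Dict.empty 0 hndks (fun c _ => PySem.Dict.contains_empty c)]
  -- B's side
  rw [pvSortedRuns l, ← hks,
    pvFoldB (fun c => l.count c) ks PySem.Dict.empty 0 hndks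
      (fun c _ => PySem.Dict.contains_empty c)
      (fun c hc => List.count_pos_iff.mpr
        ((PySem.Set.mem_ofList _ _).mp ((PySem.List.mem_sorted _ _ _ _).mp (hks ▸ hc))))]
  rw [pvCTab_congr _ (fun c => ((l.count c : Nat) : Int)) ks 0
    (fun c _ => PySem.Dict.getD_counter l c)]
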